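-- pv_equiv track=rewrite | github.com/yoelbuzgalo/unit-06-123 | big_wheel.py | stat_big_wheel_rec
-- ===== SOURCE A (Python) =====
-- def stat_big_wheel_rec(result_arr, current_index=0, count=0):
--     '''
--     This recursive function counts how many rounds were less than or equal to 100
--     '''
--     if current_index < len(result_arr):
--         if result_arr[current_index] <= 100:
--             return stat_big_wheel_rec(result_arr, (current_index+1), (count + 1)) # If number is less or equal to 100, it will add count and call the next stack
--         else:
--             return stat_big_wheel_rec(result_arr, (current_index+1), count) # If number is not less or equal to 100, it will only proceed to call next stack
--     else:
--         return count # Otherwise, just return the count if the index has reached to max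
-- ===== SOURCE B (Python) =====
-- def stat_big_wheel_rec(result_arr, current_index=0, count=0):
--     for i in range(current_index, len(result_arr)):
--         if result_arr[i] <= 100:
--             count += 1
--     return count
-- ===== Notes on version B (the rewrite author's own statement) =====
-- stated objective: idiomatic
-- what changed: Replaced the tail recursion (one stack frame per element) with a direct for-loop over range(current_index, len(result_arr)) maintaining the count accumulator.
import Mathlib
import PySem

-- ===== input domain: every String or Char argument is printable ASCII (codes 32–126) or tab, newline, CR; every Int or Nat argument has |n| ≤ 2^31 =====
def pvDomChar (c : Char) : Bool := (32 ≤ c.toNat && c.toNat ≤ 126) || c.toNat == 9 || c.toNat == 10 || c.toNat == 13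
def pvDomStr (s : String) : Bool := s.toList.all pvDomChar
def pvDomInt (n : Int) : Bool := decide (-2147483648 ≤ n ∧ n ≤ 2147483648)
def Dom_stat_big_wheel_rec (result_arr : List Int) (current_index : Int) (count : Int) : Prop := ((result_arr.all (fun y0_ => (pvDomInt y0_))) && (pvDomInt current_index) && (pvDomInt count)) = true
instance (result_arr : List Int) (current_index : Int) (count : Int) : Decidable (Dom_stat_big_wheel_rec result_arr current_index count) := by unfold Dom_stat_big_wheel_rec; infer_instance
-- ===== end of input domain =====

-- B replaces A's tail recursion (one stack frame per element) by a for-loop over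
-- range(current_index, len(result_arr)) maintaining the same count accumulator.

-- ===== PORT A =====
-- literal port of A's recursion; the 'none' branch is Python's IndexError (excluded by Pre_)
def stat_big_wheel_rec (result_arr : List Int) (current_index : Int) (count : Int) : Int :=
  if _h : current_index < (result_arr.length : Int) then
    match PySem.List.pyGet? result_arr current_index with
    | some v =>
        if v ≤ 100 then stat_big_wheel_rec result_arr (current_index + 1) (count + 1)
        else stat_big_wheel_rec result_arr (current_index + 1) count
    | none => 0
  else
    count
termination_by ((result_arr.length : Int) - current_index).toNat
decreasing_by all_goals omega

-- ===== PORT B =====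
-- literal port of B's for-loop over range(current_index, len(result_arr));
-- the 'none' arm is Python's IndexError (excluded by Pre_)
def stat_big_wheel_rec_alt (result_arr : List Int) (current_index : Int) (count : Int) : Int :=
  (PySem.List.pyRange current_index (result_arr.length : Int) 1).foldl
    (fun c i =>
      match PySem.List.pyGet? result_arr i with
      | some v => if v ≤ 100 then c + 1 else c
      | none => c)
    count

-- ===== PRECONDITION & SPEC =====
-- Pre_ excludes exactly current_index < -len(result_arr), where A raises IndexError.
def Pre_stat_big_wheel_rec (result_arr : List Int) (current_index : Int) (count : Int) : Prop :=
  -(result_arr.length : Int) ≤ current_index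
instance (result_arr : List Int) (current_index : Int) (count : Int) : Decidable (Pre_stat_big_wheel_rec result_arr current_index count) := by unfold Pre_stat_big_wheel_rec; infer_instance

def pvWitness_stat_big_wheel_rec : List Int × Int × Int := ([99, 150, -3], 0, 0)

def Spec_stat_big_wheel_rec (result_arr : List Int) (current_index : Int) (count : Int) (out : Int) : Prop := out = stat_big_wheel_rec_alt result_arr current_index count
instance (result_arr : List Int) (current_index : Int) (count : Int) (out : Int) : Decidable (Spec_stat_big_wheel_rec result_arr current_index count out) := by unfold Spec_stat_big_wheel_rec; infer_instance

-- ===== CLAIM (what is proved, stated in full; the proofs are below) =====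
def Claim_equal_stat_big_wheel_rec : Prop := ∀ (result_arr : List Int) (current_index : Int) (count : Int), Dom_stat_big_wheel_rec result_arr current_index count → Pre_stat_big_wheel_rec result_arr current_index count → Spec_stat_big_wheel_rec result_arr current_index count (stat_big_wheel_rec result_arr current_index count)

-- ===== LEMMAS AND PROOFS =====

theorem stat_big_wheel_rec_eq_alt (result_arr : List Int) (current_index : Int) (count : Int)
    (hpre : -(result_arr.length : Int) ≤ current_index) :
    stat_big_wheel_rec result_arr current_index count =
      stat_big_wheel_rec_alt result_arr current_index count := by
  rw [stat_big_wheel_rec]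
  by_cases h : current_index < (result_arr.length : Int)
  · simp only [h, dif_pos]
    cases hv : PySem.List.pyGet? result_arr current_index with
    | none =>
        rw [PySem.List.pyGet?_eq_none_iff] at hv
        exact absurd ⟨hpre, h⟩ hv
    | some v =>
        have hrec := fun c => stat_big_wheel_rec_eq_alt result_arr (current_index + 1) c (by omega)
        have hrange : PySem.List.pyRange current_index (result_arr.length : Int) 1 =
            current_index :: PySem.List.pyRange (current_index + 1) (result_arr.length : Int) 1 :=
          PySem.List.pyRange_one_cons h
        unfold stat_big_wheel_rec_alt
        rw [hrange, List.foldl_cons, hv]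
        by_cases hle : v ≤ 100
        · simpa [stat_big_wheel_rec_alt, hle] using hrec (count + 1)
        · simpa [stat_big_wheel_rec_alt, hle] using hrec count
  · simp only [h, dif_neg, not_false_iff]
    unfold stat_big_wheel_rec_alt
    rw [PySem.List.pyRange_one_eq_nil (by omega)]
    rfl
termination_by ((result_arr.length : Int) - current_index).toNat
decreasing_by omega

-- ===== VERDICT (by name: the statement is the Claim_ definition above) =====
theorem stat_big_wheel_rec_spec : Claim_equal_stat_big_wheel_rec := by
  intro arr ci cnt _ hpre
  exact stat_big_wheel_rec_eq_alt arr ci cnt hpre
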